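-- pv_equiv track=rewrite | github.com/vinchinzu/euler | python/360.py | _enumerate_integer_triples_on_sphere
-- ===== SOURCE A (Python) =====
-- from typing import Tuple
--
-- OCTANT_MULTIPLIER: int = 8
--
-- PLANE_MULTIPLIER: int = 4
--
-- AXIS_MULTIPLIER: int = 2
--
-- def integer_sqrt(n: int) -> int:
--     """Return floor(sqrt(n)) for non-negative n using integer arithmetic.
--
--     Negative inputs return 0, mirroring the behavior of the original Ruby code.
--     For correct usage in this module, callers should avoid passing negatives.
--     """
--
--     if n < 0:
--         return 0
--     if n in (0, 1):
--         return n
--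
--     low, high = 1, n
--     while low <= high:
--         mid = (low + high) // 2
--         sq = mid * mid
--         if sq == n:
--             return mid
--         if sq < n:
--             low = mid + 1
--         else:
--             high = mid - 1
--     return high
--
-- def _enumerate_integer_triples_on_sphere(r: int) -> Tuple[int, int]:
--     """Enumerate integer triples (x, y, z) on the sphere x^2 + y^2 + z^2 = r^2.
--
--     Returns a tuple (count, manhattan_sum) for the first octant (x, y, z >= 0).
--     Used as a helper for the brute-force implementation.
--     """
--
--     r_squared = r * r
--     total_manhattan_sum = 0
--
--     for x in range(0, r + 1):
--         x_sq = x * x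
--         remaining = r_squared - x_sq
--         if remaining < 0:
--             break
--
--         y_max = integer_sqrt(remaining)
--         for y in range(0, y_max + 1):
--             y_sq = y * y
--             z_sq = remaining - y_sq
--             if z_sq < 0:
--                 continue
--             z = integer_sqrt(z_sq)
--             if z * z != z_sq:
--                 continue
--             _, quadrant_sum = count_and_sum_quadrants_improved(x, y, z)
--             total_manhattan_sum += quadrant_sum
--
--     return 0, total_manhattan_sum
--
-- def count_and_sum_quadrants_improved(a: int, b: int, c: int) -> Tuple[int, int]:
--     """Return (count, manhattan_sum) over all sign-variants of (a, b, c).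
--
--     The result exploits symmetry:
--     - 3 non-zero coords: 8 symmetric points.
--     - 2 non-zero, 1 zero: 4 symmetric points (lying in coordinate planes).
--     - 1 non-zero, 2 zero: 2 symmetric points (lying on axes).
--     - all zero: the origin.
--     """
--
--     coords = (a, b, c)
--     zero_count = sum(1 for v in coords if v == 0)
--     non_zero_coords = [v for v in coords if v != 0]
--
--     if zero_count == 0:
--         # All three non-zero
--         manhattan = sum(non_zero_coords)
--         return OCTANT_MULTIPLIER, OCTANT_MULTIPLIER * manhattan
--     if zero_count == 1:
--         # Exactly one zero
--         manhattan = sum(non_zero_coords)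
--         return PLANE_MULTIPLIER, PLANE_MULTIPLIER * manhattan
--     if zero_count == 2:
--         # Exactly two zeros
--         non_zero = non_zero_coords[0]
--         return AXIS_MULTIPLIER, AXIS_MULTIPLIER * non_zero
--     if zero_count == 3:
--         # All zeros (origin)
--         return 1, 0
--
--     msg = "Invalid coordinates"
--     raise ValueError(msg)
-- ===== SOURCE B (Python) =====
-- from typing import Tuple
--
--
-- def _quadrant_sum(x: int, y: int, z: int) -> int:
--     """Manhattan-distance contribution of all sign-variants of (x, y, z):
--     each of the k non-zero coordinates doubles the orbit."""
--     nz = [v for v in (x, y, z) if v != 0]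
--     return (2 ** len(nz) if nz else 1) * sum(nz)
--
--
-- def _enumerate_integer_triples_on_sphere(r: int) -> Tuple[int, int]:
--     r_squared = r * r
--     # hash table of perfect squares: square -> its non-negative root
--     root = {z * z: z for z in range(0, r + 1)}
--     total = 0
--     for x in range(0, r + 1):
--         for y in range(0, r + 1):
--             z = root.get(r_squared - x * x - y * y)
--             if z is not None:
--                 total += _quadrant_sum(x, y, z)
--     return 0, total
-- ===== Notes on version B (the rewrite author's own statement) =====
-- stated objective: faster
-- what changed: A computes z in closed form per cell (y bounded by a hand-written binary-search integer sqrt, z = integer_sqrt(remaining - y*y) plus a perfect-square check); B has no integer sqrt at all: it precomputes a hash table mapping each perfect square to its root and resolves z by a single dictionary lookup per (x, y) cell, and folds the quadrant case analysis into a single power-of-two multiplier formula.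
import Mathlib
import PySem

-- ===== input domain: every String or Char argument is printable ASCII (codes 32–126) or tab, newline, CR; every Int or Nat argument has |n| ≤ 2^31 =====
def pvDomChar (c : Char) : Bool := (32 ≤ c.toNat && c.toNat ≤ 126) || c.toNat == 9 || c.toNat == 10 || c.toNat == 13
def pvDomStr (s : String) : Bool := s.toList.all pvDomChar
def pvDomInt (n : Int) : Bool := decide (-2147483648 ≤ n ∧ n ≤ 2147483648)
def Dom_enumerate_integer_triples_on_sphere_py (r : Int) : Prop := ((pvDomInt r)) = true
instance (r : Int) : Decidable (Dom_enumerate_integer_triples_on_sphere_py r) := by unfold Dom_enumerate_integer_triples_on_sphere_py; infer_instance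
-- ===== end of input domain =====

-- B replaces A's per-cell closed-form z (binary-search integer sqrt + perfect-square check) by a
-- precomputed hash table mapping each perfect square to its root, one dict lookup per (x, y) cell.


-- ===== PORT A =====
def OCTANT_MULTIPLIER : Int := 8
def PLANE_MULTIPLIER : Int := 4
def AXIS_MULTIPLIER : Int := 2

-- the while-loop of integer_sqrt (binary search); terminates because high - low shrinks
def integer_sqrt_loop (n low high : Int) : Int :=
  if h : low ≤ high then
    let mid := PySem.Int.floordiv (low + high) 2
    let sq := mid * mid
    if sq = n then mid
    else if sq < n then integer_sqrt_loop n (mid + 1) high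
    else integer_sqrt_loop n low (mid - 1)
  else high
termination_by (high + 1 - low).toNat
decreasing_by
  · have hb := PySem.Int.floordiv_two_mid_bounds h
    omega
  · have hb := PySem.Int.floordiv_two_mid_bounds h
    omega

def integer_sqrt_py (n : Int) : Int :=
  if n < 0 then 0
  else if n = 0 ∨ n = 1 then n
  else integer_sqrt_loop n 1 n

def count_and_sum_quadrants_improved_py (a b c : Int) : Int × Int :=
  let coords := [a, b, c]
  let zero_count : Int := (coords.map (fun v => if v = 0 then (1 : Int) else 0)).sum
  let non_zero_coords := coords.filter (fun v => !(v == 0))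
  if zero_count = 0 then (OCTANT_MULTIPLIER, OCTANT_MULTIPLIER * non_zero_coords.sum)
  else if zero_count = 1 then (PLANE_MULTIPLIER, PLANE_MULTIPLIER * non_zero_coords.sum)
  -- non_zero_coords[0]: the list is nonempty here (exactly two of the three coords are zero)
  else if zero_count = 2 then (AXIS_MULTIPLIER, AXIS_MULTIPLIER * non_zero_coords.headD 0)
  -- zero_count of a 3-tuple is at most 3, so the ValueError branch is unreachable
  else (1, 0)

-- inner 'for y' loop of A ('continue' = keep the accumulator)
def sphere_loop_y (x remaining : Int) (total : Int) : Int :=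
  (PySem.List.pyRange 0 (integer_sqrt_py remaining + 1)).foldl
    (fun total y =>
      let z_sq := remaining - y * y
      if z_sq < 0 then total
      else
        let z := integer_sqrt_py z_sq
        if z * z ≠ z_sq then total
        else total + (count_and_sum_quadrants_improved_py x y z).2)
    total

-- outer 'for x' loop of A, with the 'break' on remaining < 0
def sphere_loop_x (r_squared : Int) : List Int → Int → Int
  | [], total => total
  | x :: xs, total =>
    let remaining := r_squared - x * x
    if remaining < 0 then total
    else sphere_loop_x r_squared xs (sphere_loop_y x remaining total)

def enumerate_integer_triples_on_sphere_py (r : Int) : Int × Int :=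
  let r_squared := r * r
  (0, sphere_loop_x r_squared (PySem.List.pyRange 0 (r + 1)) 0)

-- ===== PORT B =====
def quadrant_sum_alt (x y z : Int) : Int :=
  let nz := [x, y, z].filter (fun v => !(v == 0))
  (if nz.isEmpty then 1 else 2 ^ nz.length) * nz.sum

-- hash table of perfect squares: square -> its non-negative root
def enumerate_integer_triples_on_sphere_py_alt (r : Int) : Int × Int :=
  let r_squared := r * r
  let root : PySem.Dict Int Int :=
    (PySem.List.pyRange 0 (r + 1)).foldl (fun d z => d.insert (z * z) z) PySem.Dict.empty
  (0, (PySem.List.pyRange 0 (r + 1)).foldl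
        (fun total x =>
          (PySem.List.pyRange 0 (r + 1)).foldl
            (fun total y =>
              match root.get? (r_squared - x * x - y * y) with
              | some z => total + quadrant_sum_alt x y z
              | none => total)
            total)
        0)

-- ===== PRECONDITION & SPEC =====
def Spec_enumerate_integer_triples_on_sphere_py (r : Int) (out : Int × Int) : Prop := out = enumerate_integer_triples_on_sphere_py_alt r
instance (r : Int) (out : Int × Int) : Decidable (Spec_enumerate_integer_triples_on_sphere_py r out) := by unfold Spec_enumerate_integer_triples_on_sphere_py; infer_instance

-- ===== CLAIM (what is proved, stated in full; the proofs are below) =====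
def Claim_equal_enumerate_integer_triples_on_sphere_py : Prop := ∀ (r : Int), Dom_enumerate_integer_triples_on_sphere_py r → Spec_enumerate_integer_triples_on_sphere_py r (enumerate_integer_triples_on_sphere_py r)

-- ===== LEMMAS AND PROOFS =====

-- binary-search invariant: (low-1)^2 <= n < (high+1)^2 is preserved; the result is floor(sqrt(n))
lemma integer_sqrt_loop_spec (n low high : Int) : 1 ≤ low → low ≤ high + 1 →
    (low - 1) * (low - 1) ≤ n → n < (high + 1) * (high + 1) →
    0 ≤ integer_sqrt_loop n low high ∧
      integer_sqrt_loop n low high * integer_sqrt_loop n low high ≤ n ∧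
      n < (integer_sqrt_loop n low high + 1) * (integer_sqrt_loop n low high + 1) := by
  induction low, high using integer_sqrt_loop.induct n with
  | case1 low high hle mid sq hsq =>
    intro h1 h2 h3 h4
    have hb := PySem.Int.floordiv_two_mid_bounds hle
    simp only [sq, mid] at hsq
    rw [integer_sqrt_loop]
    simp only [dif_pos hle]
    split_ifs
    all_goals exact ⟨by omega, by omega, by nlinarith [hb.1, hb.2, hsq]⟩
  | case2 low high hle mid sq hne hlt ih =>
    intro h1 h2 h3 h4
    have hb := PySem.Int.floordiv_two_mid_bounds hle
    simp only [sq, mid] at hne hlt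
    rw [integer_sqrt_loop]
    simp only [dif_pos hle]
    split_ifs
    exact ih (by omega) (by omega) (by nlinarith [hlt]) h4
  | case3 low high hle mid sq hne hge ih =>
    intro h1 h2 h3 h4
    have hb := PySem.Int.floordiv_two_mid_bounds hle
    simp only [sq, mid] at hne hge
    rw [integer_sqrt_loop]
    simp only [dif_pos hle]
    split_ifs
    refine ih h1 (by omega) h3 ?_
    have h5 : n < PySem.Int.floordiv (low + high) 2 * PySem.Int.floordiv (low + high) 2 := by omega
    simp only [mid]
    nlinarith [h5]
  | case4 low high hle =>
    intro h1 h2 h3 h4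
    rw [integer_sqrt_loop]
    simp only [dif_neg hle]
    have heq : high = low - 1 := by omega
    subst heq
    exact ⟨by omega, by simpa using h3, by simpa using h4⟩

lemma integer_sqrt_spec (n : Int) (hn : 0 ≤ n) :
    0 ≤ integer_sqrt_py n ∧ integer_sqrt_py n * integer_sqrt_py n ≤ n ∧
      n < (integer_sqrt_py n + 1) * (integer_sqrt_py n + 1) := by
  unfold integer_sqrt_py
  split_ifs with g1 g2
  · omega
  · rcases g2 with h | h <;> subst h <;> norm_num
  · exact integer_sqrt_loop_spec n 1 n (by omega) (by omega) (by omega) (by nlinarith)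

lemma isqrt_unique (s z n : Int) (hs0 : 0 ≤ s) (hz0 : 0 ≤ z) (hs1 : s * s ≤ n)
    (hs2 : n < (s + 1) * (s + 1)) (hzz : z * z = n) : z = s := by
  have h1 : z < s + 1 := by nlinarith
  have h2 : s ≤ z := by nlinarith
  omega

lemma sq_inj (a b : Int) (ha : 0 ≤ a) (hb : 0 ≤ b) (h : a * a = b * b) : a = b := by nlinarith

lemma quadrant_eq (a b c : Int) :
    (count_and_sum_quadrants_improved_py a b c).2 = quadrant_sum_alt a b c := by
  by_cases ha : a = 0 <;> by_cases hb : b = 0 <;> by_cases hc : c = 0 <;>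
    simp [count_and_sum_quadrants_improved_py, quadrant_sum_alt, OCTANT_MULTIPLIER,
      PLANE_MULTIPLIER, AXIS_MULTIPLIER, ha, hb, hc]

-- a foldl whose body only adds a function of the element is the initial value plus the mapped sum
lemma foldl_body_add (l : List Int) (f : Int → Int → Int) (g : Int → Int)
    (h : ∀ a x, f a x = a + g x) (a : Int) : l.foldl f a = a + (l.map g).sum := by
  have hf : f = fun a x => a + g x := by funext a x; rw [h]
  rw [hf, PySem.List.foldl_add]

-- the summand of A's inner y-loop
def gA (x remaining y : Int) : Int :=
  if remaining - y * y < 0 then 0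
  else if integer_sqrt_py (remaining - y * y) * integer_sqrt_py (remaining - y * y) ≠
      remaining - y * y then 0
  else (count_and_sum_quadrants_improved_py x y (integer_sqrt_py (remaining - y * y))).2

def SA (x remaining : Int) : Int :=
  ((PySem.List.pyRange 0 (integer_sqrt_py remaining + 1)).map (gA x remaining)).sum

def rootDict (r : Int) : PySem.Dict Int Int :=
  (PySem.List.pyRange 0 (r + 1)).foldl (fun d z => d.insert (z * z) z) PySem.Dict.empty

-- the summand of B's inner y-loop
def gB (r x y : Int) : Int :=
  match (rootDict r).get? (r * r - x * x - y * y) with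
  | some z => quadrant_sum_alt x y z
  | none => 0

def SBy (r x : Int) : Int := ((PySem.List.pyRange 0 (r + 1)).map (gB r x)).sum

lemma sphere_loop_y_eq (x remaining t : Int) :
    sphere_loop_y x remaining t = t + SA x remaining := by
  unfold sphere_loop_y SA
  apply foldl_body_add
  intro a y
  simp only [gA]
  split_ifs <;> ring

lemma sphere_loop_x_eq (rsq : Int) (l : List Int) (h : ∀ x ∈ l, 0 ≤ rsq - x * x) (t : Int) :
    sphere_loop_x rsq l t = t + (l.map (fun x => SA x (rsq - x * x))).sum := by
  induction l generalizing t with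
  | nil => simp [sphere_loop_x]
  | cons x xs ih =>
    have hx := h x List.mem_cons_self
    simp only [sphere_loop_x, if_neg (by omega : ¬ rsq - x * x < 0)]
    rw [ih (fun y hy => h y (List.mem_cons_of_mem _ hy)), sphere_loop_y_eq]
    simp [List.map_cons, List.sum_cons]
    ring

lemma alt_eq (r : Int) :
    enumerate_integer_triples_on_sphere_py_alt r =
      (0, ((PySem.List.pyRange 0 (r + 1)).map (fun x => SBy r x)).sum) := by
  unfold enumerate_integer_triples_on_sphere_py_alt
  dsimp only
  have hy : ∀ x total, (PySem.List.pyRange 0 (r + 1)).foldl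
      (fun total y => match ((PySem.List.pyRange 0 (r + 1)).foldl
          (fun d z => d.insert (z * z) z) PySem.Dict.empty).get? (r * r - x * x - y * y) with
        | some z => total + quadrant_sum_alt x y z
        | none => total) total = total + SBy r x := by
    intro x total
    apply foldl_body_add
    intro a y
    simp only [gB, rootDict]
    cases ((PySem.List.pyRange 0 (r + 1)).foldl
        (fun d z => d.insert (z * z) z) PySem.Dict.empty).get? (r * r - x * x - y * y) <;>
      simp
  have hx : (fun (total x : Int) => (PySem.List.pyRange 0 (r + 1)).foldl
      (fun total y => match ((PySem.List.pyRange 0 (r + 1)).foldl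
          (fun d z => d.insert (z * z) z) PySem.Dict.empty).get? (r * r - x * x - y * y) with
        | some z => total + quadrant_sum_alt x y z
        | none => total) total) = fun total x => total + SBy r x := by
    funext total x; exact hy x total
  rw [hx, PySem.List.foldl_add]
  simp

-- the dict built by inserting z*z ↦ z answers lookups by scanning the insertion list
lemma get_build (l : List Int) (hinj : ∀ a ∈ l, ∀ b ∈ l, a * a = b * b → a = b)
    (d : PySem.Dict Int Int) (w : Int) :
    (l.foldl (fun d z => d.insert (z * z) z) d).get? w =
      match l.find? (fun z => z * z == w) with
      | some z => some z
      | none => d.get? w := by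
  induction l generalizing d with
  | nil => simp
  | cons z t ih =>
    have hinj' : ∀ a ∈ t, ∀ b ∈ t, a * a = b * b → a = b := fun a ha b hb =>
      hinj a (List.mem_cons_of_mem _ ha) b (List.mem_cons_of_mem _ hb)
    simp only [List.foldl_cons]
    rw [ih hinj']
    by_cases hw : z * z = w
    · have hfind : (z :: t).find? (fun z => z * z == w) = some z := by
        simp [hw]
      rw [hfind]
      cases ht : t.find? (fun z => z * z == w) with
      | some z' =>
        have hz' : z' * z' = w := by simpa using List.find?_some ht
        have : z' = z := hinj z' (List.mem_cons_of_mem _ (List.mem_of_find?_eq_some ht)) z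
          List.mem_cons_self (by omega)
        simp [this]
      | none =>
        subst hw
        exact PySem.Dict.get?_insert_self d (z * z) z
    · have hfind : (z :: t).find? (fun z => z * z == w) = t.find? (fun z => z * z == w) := by
        simp [hw]
      rw [hfind]
      cases t.find? (fun z => z * z == w) with
      | some z' => rfl
      | none => exact PySem.Dict.get?_insert_of_ne d _ (fun h => hw h.symm)

lemma root_get (r w : Int) :
    (rootDict r).get? w =
      match (PySem.List.pyRange 0 (r + 1)).find? (fun z => z * z == w) with
      | some z => some z
      | none => none := by
  unfold rootDict
  rw [get_build _ (fun a ha b hb hab => sq_inj a b (PySem.List.mem_pyRange_one.mp ha).1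
    (PySem.List.mem_pyRange_one.mp hb).1 hab)]
  cases (PySem.List.pyRange 0 (r + 1)).find? (fun z => z * z == w) with
  | some z => rfl
  | none => simp [PySem.Dict.empty, PySem.Dict.get?]

-- the heart: for 0 ≤ x ≤ r, B's lookup loop over y computes A's inner loop over y
lemma per_x (r x : Int) (hx0 : 0 ≤ x) (hxr : x ≤ r) : SBy r x = SA x (r * r - x * x) := by
  have hr0 : 0 ≤ r := le_trans hx0 hxr
  have hrem0 : 0 ≤ r * r - x * x := by nlinarith
  obtain ⟨hM0, hM1, hM2⟩ := integer_sqrt_spec (r * r - x * x) hrem0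
  have hMr : integer_sqrt_py (r * r - x * x) ≤ r := by nlinarith
  have hsplit := PySem.List.pyRange_one_append 0 (integer_sqrt_py (r * r - x * x) + 1) (r + 1)
    (by omega) (by omega)
  unfold SBy SA
  rw [hsplit, List.map_append, List.sum_append]
  have htail : ((PySem.List.pyRange (integer_sqrt_py (r * r - x * x) + 1) (r + 1)).map
      (gB r x)).sum = 0 := by
    apply List.sum_eq_zero
    intro v hv
    rcases List.mem_map.mp hv with ⟨y, hy, hveq⟩
    have hyb := PySem.List.mem_pyRange_one.mp hy
    subst hveq
    have hzsqneg : r * r - x * x - y * y < 0 := by nlinarith [hM2, hyb.1]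
    have hfind : (PySem.List.pyRange 0 (r + 1)).find? (fun z => z * z == r * r - x * x - y * y)
        = none := by
      rw [List.find?_eq_none]
      intro z hz
      have hzb := PySem.List.mem_pyRange_one.mp hz
      simp only [beq_iff_eq]
      nlinarith [hzb.1]
    simp [gB, root_get, hfind]
  rw [htail, add_zero]
  refine congrArg List.sum (List.map_congr_left ?_)
  intro y hy
  have hyb := PySem.List.mem_pyRange_one.mp hy
  have hzsq0 : 0 ≤ r * r - x * x - y * y := by nlinarith [hM1, hyb.1, hyb.2]
  obtain ⟨hz0, hz1, hz2⟩ := integer_sqrt_spec (r * r - x * x - y * y) hzsq0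
  have hzr : integer_sqrt_py (r * r - x * x - y * y) ≤ r := by nlinarith
  have hrem : ¬ (r * r - x * x - y * y < 0) := by omega
  by_cases hperf : integer_sqrt_py (r * r - x * x - y * y) *
      integer_sqrt_py (r * r - x * x - y * y) = r * r - x * x - y * y
  · -- perfect square: the table lookup finds exactly z = integer_sqrt(z_sq)
    cases hfind : (PySem.List.pyRange 0 (r + 1)).find?
        (fun z => z * z == r * r - x * x - y * y) with
    | none =>
      exfalso
      have := List.find?_eq_none.mp hfind (integer_sqrt_py (r * r - x * x - y * y))
        (PySem.List.mem_pyRange_one.mpr ⟨hz0, by omega⟩)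
      simp only [beq_iff_eq] at this
      exact this hperf
    | some z =>
      have hzsq : z * z = r * r - x * x - y * y := by simpa using List.find?_some hfind
      have hzmem := PySem.List.mem_pyRange_one.mp (List.mem_of_find?_eq_some hfind)
      have hzeq : z = integer_sqrt_py (r * r - x * x - y * y) :=
        isqrt_unique _ z _ hz0 hzmem.1 hz1 hz2 hzsq
      simp only [gB, root_get, hfind, gA, if_neg hrem, if_neg (by omega : ¬ (integer_sqrt_py
        (r * r - x * x - y * y) * integer_sqrt_py (r * r - x * x - y * y) ≠
        r * r - x * x - y * y))]
      rw [hzeq, quadrant_eq]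
  · -- not a perfect square: the lookup misses and A's check fails; both sides are 0
    have hfind : (PySem.List.pyRange 0 (r + 1)).find?
        (fun z => z * z == r * r - x * x - y * y) = none := by
      rw [List.find?_eq_none]
      intro z hz
      have hzb := PySem.List.mem_pyRange_one.mp hz
      simp only [beq_iff_eq]
      intro hzz
      exact hperf (by rw [← isqrt_unique _ z _ hz0 hzb.1 hz1 hz2 hzz]; exact hzz)
    simp only [gB, root_get, hfind, gA, if_neg hrem]
    rw [if_pos hperf]

-- ===== VERDICT (by name: the statement is the Claim_ definition above) =====
theorem enumerate_integer_triples_on_sphere_py_spec : Claim_equal_enumerate_integer_triples_on_sphere_py := by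
  intro r _
  unfold Spec_enumerate_integer_triples_on_sphere_py
  rw [alt_eq]
  unfold enumerate_integer_triples_on_sphere_py
  dsimp only
  have hdom : ∀ x ∈ PySem.List.pyRange 0 (r + 1), 0 ≤ r * r - x * x := by
    intro x hx
    have hxb := PySem.List.mem_pyRange_one.mp hx
    nlinarith [hxb.1, hxb.2]
  rw [sphere_loop_x_eq (r * r) _ hdom 0]
  have hmap : (PySem.List.pyRange 0 (r + 1)).map (fun x => SA x (r * r - x * x)) =
      (PySem.List.pyRange 0 (r + 1)).map (fun x => SBy r x) := by
    apply List.map_congr_left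
    intro x hx
    have hxb := PySem.List.mem_pyRange_one.mp hx
    exact (per_x r x hxb.1 (by omega)).symm
  rw [hmap]
  simp
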